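-- pv_equiv track=rewrite | github.com/mapio/advent-of-code-2019 | day25/sol.py | parse
-- ===== SOURCE A (Python) =====
-- def parse(out):
--     indir = False
--     inobj = False
--     dirs = []
--     objs = []
--     for line in out.splitlines():
--         if indir:
--             if line.startswith('-'):
--                 dirs.append(line[2:])
--             else:
--                 indir = False
--         if inobj:
--             if line.startswith('-'):
--                 objs.append(line[2:])
--             else:
--                 inobj = False
--         if line.startswith('Doors here lead'):
--             indir = True
--         elif line.startswith('Items here'):
--             inobj = True
--         elif line.startswith('=='):
--             room = line[3:-3]
--     return room, dirs, objs
-- ===== SOURCE B (Python) =====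
-- def parse(out):
--     lines = out.splitlines()
--     dirs = []
--     objs = []
--     i = 0
--     n = len(lines)
--     while i < n:
--         line = lines[i]
--         if line.startswith('Doors here lead') or line.startswith('Items here'):
--             target = dirs if line.startswith('Doors here lead') else objs
--             i += 1
--             while i < n and lines[i].startswith('-'):
--                 target.append(lines[i][2:])
--                 i += 1
--             # the stopping line is re-processed by the outer loop
--         else:
--             if line.startswith('=='):
--                 room = line[3:-3]
--             i += 1
--     return room, dirs, objs
-- ===== Notes on version B (the rewrite author's own statement) =====
-- stated objective: simpler
-- what changed: Replaces A's per-line boolean-flag state machine (indir/inobj carried across iterations) with one indexed pass whose inner loop collects the '-'-lines following a 'Doors here lead'/'Items here' header, leaving the stopping line for the outer loop.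
import Mathlib
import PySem

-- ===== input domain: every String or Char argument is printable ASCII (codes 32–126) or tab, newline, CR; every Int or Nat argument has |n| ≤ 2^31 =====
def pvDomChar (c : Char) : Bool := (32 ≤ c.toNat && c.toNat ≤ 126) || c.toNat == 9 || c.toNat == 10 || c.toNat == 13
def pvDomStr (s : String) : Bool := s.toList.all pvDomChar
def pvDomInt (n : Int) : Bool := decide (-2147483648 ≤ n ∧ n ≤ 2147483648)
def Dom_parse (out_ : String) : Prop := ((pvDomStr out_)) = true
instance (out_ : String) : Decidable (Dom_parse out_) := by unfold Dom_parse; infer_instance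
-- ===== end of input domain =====

-- B is a simpler decomposition: one indexed pass with an inner dash-collecting loop instead of A's boolean-flag state machine; equal return values on Pre_.

-- ===== PORT A =====
-- A's for-loop over splitlines as structural recursion over the list of lines;
-- state = (indir, inobj, dirs, objs, room?); room is Option since Python's `room` is unbound until set.
def parseGoA : List String → Bool → Bool → List String → List String → Option String →
    String × List String × List String
  | [], _, _, dirs, objs, room => (room.getD "", dirs, objs)
  | line :: rest, indir, inobj, dirs, objs, room =>
    let p1 : Bool × List String :=
      if indir then
        if PySem.Str.startswith line "-" then
          (true, dirs ++ [PySem.Str.slice line (some 2) none])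
        else (false, dirs)
      else (indir, dirs)
    let p2 : Bool × List String :=
      if inobj then
        if PySem.Str.startswith line "-" then
          (true, objs ++ [PySem.Str.slice line (some 2) none])
        else (false, objs)
      else (inobj, objs)
    if PySem.Str.startswith line "Doors here lead" then
      parseGoA rest true p2.1 p1.2 p2.2 room
    else if PySem.Str.startswith line "Items here" then
      parseGoA rest p1.1 true p1.2 p2.2 room
    else if PySem.Str.startswith line "==" then
      parseGoA rest p1.1 p2.1 p1.2 p2.2 (some (PySem.Str.slice line (some 3) (some (-3))))
    else
      parseGoA rest p1.1 p2.1 p1.2 p2.2 room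

def parse (out_ : String) : String × List String × List String :=
  parseGoA (PySem.Str.splitlines out_) false false [] [] none

-- ===== PORT B =====
-- Source B's inner while loop: take the `line[2:]` of the leading '-'-lines, return them with the rest.
def collectDash : List String → List String × List String
  | [] => ([], [])
  | l :: ls =>
    if PySem.Str.startswith l "-" then
      let p := collectDash ls
      (PySem.Str.slice l (some 2) none :: p.1, p.2)
    else ([], l :: ls)

theorem collectDash_snd_length_le : ∀ ls : List String, (collectDash ls).2.length ≤ ls.length := by
  intro ls
  induction ls with
  | nil => simp [collectDash]
  | cons l ls ih =>
    simp only [collectDash]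
    split
    · exact Nat.le_succ_of_le ih
    · simp

-- Source B's outer while loop over the lines, by index ↔ structural position;
-- room is Option since Source B's `room` is unbound until an '=='-line (inside Pre_ it is always set).
def parseGoB : List String → Option String → List String → List String →
    String × List String × List String
  | [], room, dirs, objs => (room.getD "", dirs, objs)
  | l :: ls, room, dirs, objs =>
    if PySem.Str.startswith l "Doors here lead" then
      let p := collectDash ls
      parseGoB p.2 room (dirs ++ p.1) objs
    else if PySem.Str.startswith l "Items here" then
      let p := collectDash ls
      parseGoB p.2 room dirs (objs ++ p.1)
    else if PySem.Str.startswith l "==" then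
      parseGoB ls (some (PySem.Str.slice l (some 3) (some (-3)))) dirs objs
    else
      parseGoB ls room dirs objs
termination_by ls _ _ _ => ls.length
decreasing_by
  · exact Nat.lt_succ_of_le (collectDash_snd_length_le ls)
  · exact Nat.lt_succ_of_le (collectDash_snd_length_le ls)
  · exact Nat.lt_succ_self _
  · exact Nat.lt_succ_self _

def parse_alt (out_ : String) : String × List String × List String :=
  parseGoB (PySem.Str.splitlines out_) none [] []

-- ===== PRECONDITION & SPEC =====
-- Pre_ excludes inputs with no '=='-line: there Python A raises NameError (`room` unbound).
def Pre_parse (out_ : String) : Prop :=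
  ∃ l ∈ PySem.Str.splitlines out_, PySem.Str.startswith l "==" = true
instance (out_ : String) : Decidable (Pre_parse out_) := by unfold Pre_parse; infer_instance
def pvWitness_parse : String := "== Hull ==\nDoors here lead\n- north"

def Spec_parse (out_ : String) (out : String × List String × List String) : Prop := out = parse_alt out_
instance (out_ : String) (out : String × List String × List String) : Decidable (Spec_parse out_ out) := by unfold Spec_parse; infer_instance

-- ===== CLAIM (what is proved, stated in full; the proofs are below) =====
def Claim_equal_parse : Prop := ∀ (out_ : String), Dom_parse out_ → Pre_parse out_ → Spec_parse out_ (parse out_)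

-- ===== LEMMAS AND PROOFS =====

theorem dash_head {l : String} (h : PySem.Str.startswith l "-" = true) :
    l.toList.head? = some '-' := by
  rw [PySem.Str.startswith_eq, PySem.Chars.startswith_iff] at h
  rcases h with ⟨t, ht⟩
  rw [← ht]
  rfl

theorem dash_not_doors {l : String} (h : PySem.Str.startswith l "-" = true) :
    PySem.Str.startswith l "Doors here lead" = false := by
  have hh := dash_head h
  rw [PySem.Str.startswith_eq]
  rw [Bool.eq_false_iff]
  intro hc
  rw [PySem.Chars.startswith_iff] at hc
  rcases hc with ⟨t, ht⟩
  rw [← ht] at hh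
  simp at hh

theorem dash_not_items {l : String} (h : PySem.Str.startswith l "-" = true) :
    PySem.Str.startswith l "Items here" = false := by
  have hh := dash_head h
  rw [PySem.Str.startswith_eq]
  rw [Bool.eq_false_iff]
  intro hc
  rw [PySem.Chars.startswith_iff] at hc
  rcases hc with ⟨t, ht⟩
  rw [← ht] at hh
  simp at hh

theorem dash_not_eqeq {l : String} (h : PySem.Str.startswith l "-" = true) :
    PySem.Str.startswith l "==" = false := by
  have hh := dash_head h
  rw [PySem.Str.startswith_eq]
  rw [Bool.eq_false_iff]
  intro hc
  rw [PySem.Chars.startswith_iff] at hc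
  rcases hc with ⟨t, ht⟩
  rw [← ht] at hh
  simp at hh

-- while indir: A consumes the leading '-'-lines exactly as collectDash does
theorem goA_indir : ∀ (ls dirs objs : List String) (room : Option String),
    parseGoA ls true false dirs objs room =
      parseGoA (collectDash ls).2 false false (dirs ++ (collectDash ls).1) objs room := by
  intro ls
  induction ls with
  | nil => intro dirs objs room; simp [collectDash, parseGoA]
  | cons l ls ih =>
    intro dirs objs room
    by_cases hd : PySem.Str.startswith l "-" = true
    · simp only [collectDash, hd, if_true]
      simp only [parseGoA, hd, dash_not_doors hd, dash_not_items hd, dash_not_eqeq hd,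
        if_true, if_false, Bool.false_eq_true]
      rw [ih]
      simp
    · rw [Bool.not_eq_true] at hd
      have hd' : PySem.Chars.startswith l.toList ['-'] = false := hd
      simp [collectDash, parseGoA, hd']

theorem goA_inobj : ∀ (ls dirs objs : List String) (room : Option String),
    parseGoA ls false true dirs objs room =
      parseGoA (collectDash ls).2 false false dirs (objs ++ (collectDash ls).1) room := by
  intro ls
  induction ls with
  | nil => intro dirs objs room; simp [collectDash, parseGoA]
  | cons l ls ih =>
    intro dirs objs room
    by_cases hd : PySem.Str.startswith l "-" = true
    · simp only [collectDash, hd, if_true]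
      simp only [parseGoA, hd, dash_not_doors hd, dash_not_items hd, dash_not_eqeq hd,
        if_true, if_false, Bool.false_eq_true]
      rw [ih]
      simp
    · rw [Bool.not_eq_true] at hd
      have hd' : PySem.Chars.startswith l.toList ['-'] = false := hd
      simp [collectDash, parseGoA, hd']

theorem goA_eq_goB : ∀ (n : Nat) (ls : List String), ls.length ≤ n →
    ∀ (dirs objs : List String) (room : Option String),
      parseGoA ls false false dirs objs room = parseGoB ls room dirs objs := by
  intro n
  induction n with
  | zero =>
    intro ls hn dirs objs room
    have : ls = [] := List.eq_nil_of_length_eq_zero (Nat.le_zero.mp hn)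
    subst this
    simp [parseGoA, parseGoB]
  | succ n ih =>
    intro ls hn dirs objs room
    cases ls with
    | nil => simp [parseGoA, parseGoB]
    | cons l ls =>
      rw [parseGoB]
      by_cases h1 : PySem.Str.startswith l "Doors here lead" = true
      · have h1' : PySem.Chars.startswith l.toList ['D', 'o', 'o', 'r', 's', ' ', 'h', 'e', 'r', 'e', ' ', 'l', 'e', 'a', 'd'] = true := h1
        simp only [h1, if_true]
        simp [parseGoA, h1']
        rw [goA_indir,
          ih _ (le_trans (collectDash_snd_length_le ls) (Nat.le_of_succ_le_succ hn))]
      · rw [Bool.not_eq_true] at h1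
        have h1' : PySem.Chars.startswith l.toList ['D', 'o', 'o', 'r', 's', ' ', 'h', 'e', 'r', 'e', ' ', 'l', 'e', 'a', 'd'] = false := h1
        by_cases h2 : PySem.Str.startswith l "Items here" = true
        · have h2' : PySem.Chars.startswith l.toList ['I', 't', 'e', 'm', 's', ' ', 'h', 'e', 'r', 'e'] = true := h2
          simp only [h1, h2, Bool.false_eq_true, if_false, if_true]
          simp [parseGoA, h1', h2']
          rw [goA_inobj,
            ih _ (le_trans (collectDash_snd_length_le ls) (Nat.le_of_succ_le_succ hn))]
        · rw [Bool.not_eq_true] at h2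
          have h2' : PySem.Chars.startswith l.toList ['I', 't', 'e', 'm', 's', ' ', 'h', 'e', 'r', 'e'] = false := h2
          by_cases h3 : PySem.Str.startswith l "==" = true
          · have h3' : PySem.Chars.startswith l.toList ['=', '='] = true := h3
            simp only [h1, h2, h3, Bool.false_eq_true, if_false, if_true]
            simp [parseGoA, h1', h2', h3']
            rw [ih _ (Nat.le_of_succ_le_succ hn)]
          · rw [Bool.not_eq_true] at h3
            have h3' : PySem.Chars.startswith l.toList ['=', '='] = false := h3
            simp only [h1, h2, h3, Bool.false_eq_true, if_false]
            simp [parseGoA, h1', h2', h3']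
            rw [ih _ (Nat.le_of_succ_le_succ hn)]

-- ===== VERDICT (by name: the statement is the Claim_ definition above) =====
theorem parse_spec : Claim_equal_parse := by
  intro out_ _ _
  unfold Spec_parse parse parse_alt
  exact goA_eq_goB _ _ (le_refl _) [] [] none
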